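-- pv_equiv track=rewrite | github.com/pavelanni/attack-surface-tech | scripts/convert_to_markdown_v2.py | fix_typos
-- ===== SOURCE A (Python) =====
-- def fix_typos(content):
--     """Fix known typos in the content"""
--     typos = {
--         "conatining": "containing",
--         "logeers": "loggers",
--         "Fibbonaci": "Fibonacci",
--         "identifaction": "identification",
--         "hierarchial": "hierarchical",
--         "lightbulbs": "light bulbs",
--         "hense": "hence",
--         " amd ": " and ",
--         "That`'s": "That's",
--         "`medium-loud AAAAAH`": '"medium-loud AAAAAH"',
--     }
--
--     for typo, correction in typos.items():
--         content = content.replace(typo, correction)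
--
--     return content
-- ===== SOURCE B (Python) =====
-- def fix_typos(content):
--     """Fix known typos in the content (single left-to-right scan)"""
--     typos = [
--         ("conatining", "containing"),
--         ("logeers", "loggers"),
--         ("Fibbonaci", "Fibonacci"),
--         ("identifaction", "identification"),
--         ("hierarchial", "hierarchical"),
--         ("lightbulbs", "light bulbs"),
--         ("hense", "hence"),
--         (" amd ", " and "),
--         ("That`'s", "That's"),
--         ("`medium-loud AAAAAH`", '"medium-loud AAAAAH"'),
--     ]
--     out = []
--     i = 0
--     n = len(content)
--     while i < n:
--         for typo, correction in typos:
--             if content.startswith(typo, i):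
--                 out.append(correction)
--                 i += len(typo)
--                 break
--         else:
--             out.append(content[i])
--             i += 1
--     return "".join(out)
-- ===== Notes on version B (the rewrite author's own statement) =====
-- stated objective: alternative
-- what changed: Replaces ten sequential whole-string replace() passes by one left-to-right scan that tries the typo table at each position; Pre_ excludes contents containing one of the three substrings listed in cites, on which A's later passes rescan the output of earlier replacements while B's single pass does not, a corner of overlapping typos where both results are defensible.
-- outside the precondition, e.g. on fix_typos('hierarchialogeers'): A returns 'hierarchicaloggers', B returns 'hierarchicalogeers'; on fix_typos('Fibbonacidentifaction'): A returns 'Fibonaccidentification', B returns 'Fibonaccidentifaction'; on fix_typos('hierarchialightbulbs'): A returns 'hierarchicalight bulbs', B returns 'hierarchicalightbulbs'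
import Mathlib
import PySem

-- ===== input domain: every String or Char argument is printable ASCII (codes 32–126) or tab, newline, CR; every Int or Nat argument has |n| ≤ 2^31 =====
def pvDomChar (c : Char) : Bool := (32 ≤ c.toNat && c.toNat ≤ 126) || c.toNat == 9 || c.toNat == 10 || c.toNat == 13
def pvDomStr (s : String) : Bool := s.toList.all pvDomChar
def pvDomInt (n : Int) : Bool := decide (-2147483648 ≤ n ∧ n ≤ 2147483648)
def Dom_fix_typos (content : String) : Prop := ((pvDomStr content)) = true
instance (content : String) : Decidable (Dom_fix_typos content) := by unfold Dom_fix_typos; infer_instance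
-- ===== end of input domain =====

-- B replaces A's ten sequential whole-string replace passes by one left-to-right scan over the
-- content that substitutes from the typo table at each position (objective: alternative algorithm).

-- ===== PORT A =====
-- the typo dict, as an association list in insertion order
def pvTyposA : List (String × String) :=
  [("conatining", "containing"),
   ("logeers", "loggers"),
   ("Fibbonaci", "Fibonacci"),
   ("identifaction", "identification"),
   ("hierarchial", "hierarchical"),
   ("lightbulbs", "light bulbs"),
   ("hense", "hence"),
   (" amd ", " and "),
   ("That`'s", "That's"),
   ("`medium-loud AAAAAH`", "\"medium-loud AAAAAH\"")]

-- `for typo, correction in typos.items(): content = content.replace(typo, correction)`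
def fix_typos (content : String) : String :=
  pvTyposA.foldl (fun c p => PySem.Str.replace c p.1 p.2) content

-- ===== PORT B =====
-- Source B's typo table, over code points
def pvRules : List (List Char × List Char) :=
  [("conatining".toList, "containing".toList),
   ("logeers".toList, "loggers".toList),
   ("Fibbonaci".toList, "Fibonacci".toList),
   ("identifaction".toList, "identification".toList),
   ("hierarchial".toList, "hierarchical".toList),
   ("lightbulbs".toList, "light bulbs".toList),
   ("hense".toList, "hence".toList),
   (" amd ".toList, " and ".toList),
   ("That`'s".toList, "That's".toList),
   ("`medium-loud AAAAAH`".toList, "\"medium-loud AAAAAH\"".toList)]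

-- the inner `for typo, correction in typos: if content.startswith(typo, i): … break`
def pvFindRule (rs : List (List Char × List Char)) (s : List Char) :
    Option (List Char × List Char) :=
  match rs with
  | [] => none
  | r :: rest => if r.1.isPrefixOf s then some r else pvFindRule rest s

-- the `while i < n` scan; on a match we consume the matched key ((c::t).drop r.1.length
-- is written List.drop (r.1.length - 1) t, which also makes termination structural)
def pvScanW (rs : List (List Char × List Char)) : List Char → List Char
  | [] => []
  | c :: t =>
    match pvFindRule rs (c :: t) with
    | some r => r.2 ++ pvScanW rs (List.drop (r.1.length - 1) t)
    | none => c :: pvScanW rs t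
termination_by s => s.length
decreasing_by
  · simp only [List.length_cons, List.length_drop]; omega
  · simp only [List.length_cons]; omega

def fix_typos_alt (content : String) : String :=
  String.ofList (pvScanW pvRules content.toList)

-- ===== PRECONDITION & SPEC =====
-- Pre_ excludes contents containing three specific overlapping-typo substrings, on which A's later
-- replace passes rescan the output of earlier replacements while B's single pass does not: a
-- corner of overlapping typos where both cascade and single-pass results are defensible.
def Pre_fix_typos (content : String) : Prop :=
  PySem.Str.isIn "hierarchialogeers" content = false ∧
  PySem.Str.isIn "Fibbonacidentifaction" content = false ∧
  PySem.Str.isIn "hierarchialightbulbs" content = false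
instance (content : String) : Decidable (Pre_fix_typos content) := by
  unfold Pre_fix_typos; infer_instance

def pvWitness_fix_typos : String := "That`'s a hierarchial list conatining lightbulbs amd logeers"

def Spec_fix_typos (content : String) (out : String) : Prop := out = fix_typos_alt content
instance (content : String) (out : String) : Decidable (Spec_fix_typos content out) := by
  unfold Spec_fix_typos; infer_instance

-- ===== CLAIM (what is proved, stated in full; the proofs are below) =====
def Claim_equal_fix_typos : Prop :=
  ∀ (content : String), Dom_fix_typos content → Pre_fix_typos content →
    Spec_fix_typos content (fix_typos content)

-- ===== LEMMAS AND PROOFS =====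

-- structural version of Python str.replace for a nonempty pattern
def pvRepl (old new : List Char) : List Char → List Char
  | [] => []
  | c :: t =>
    if old.isPrefixOf (c :: t) then new ++ pvRepl old new (List.drop (old.length - 1) t)
    else c :: pvRepl old new t
termination_by s => s.length
decreasing_by
  · simp only [List.length_cons, List.length_drop]; omega
  · simp only [List.length_cons]; omega

theorem pvRepl_nil (old new : List Char) : pvRepl old new [] = [] := by
  simp [pvRepl]

theorem pvRepl_cons_pos {k v : List Char} (c : Char) (t : List Char)
    (h : k <+: (c :: t)) :
    pvRepl k v (c :: t) = v ++ pvRepl k v (List.drop (k.length - 1) t) := by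
  rw [pvRepl]
  simp [List.isPrefixOf_iff_prefix.mpr h]

theorem pvRepl_cons_neg {k v : List Char} (c : Char) (t : List Char)
    (h : ¬ k <+: (c :: t)) :
    pvRepl k v (c :: t) = c :: pvRepl k v t := by
  rw [pvRepl, if_neg (fun hb => h (List.isPrefixOf_iff_prefix.mp hb))]

theorem pvReplGo_spec (old new : List Char) (h : old ≠ []) :
    ∀ fuel l acc, l.length ≤ fuel →
      PySem.Chars.replace.go old new fuel l acc = acc.reverse ++ pvRepl old new l := by
  intro fuel
  induction fuel with
  | zero =>
    intro l acc hl
    have : l = [] := List.eq_nil_of_length_eq_zero (by omega)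
    subst this
    rw [PySem.Chars.replace.go, pvRepl_nil]
  | succ f ih =>
    intro l acc hl
    match l with
    | [] => rw [PySem.Chars.replace.go] <;> simp [pvRepl_nil]
    | c :: t =>
      obtain ⟨o, os, rfl⟩ : ∃ o os, old = o :: os := by
        cases old with
        | nil => exact absurd rfl h
        | cons o os => exact ⟨o, os, rfl⟩
      rw [PySem.Chars.replace.go]
      by_cases hp : (o :: os) <+: (c :: t)
      · rw [if_pos (List.isPrefixOf_iff_prefix.mpr hp)]
        rw [ih _ _ (by simp at hl ⊢; omega)]
        rw [pvRepl_cons_pos c t hp]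
        simp [List.length_cons]
      · rw [if_neg (fun hb => hp (List.isPrefixOf_iff_prefix.mp hb))]
        rw [ih _ _ (by simp at hl ⊢; omega)]
        rw [pvRepl_cons_neg c t hp]
        simp

theorem replace_eq_pvRepl (old new s : List Char) (h : old ≠ []) :
    PySem.Chars.replace s old new = pvRepl old new s := by
  rw [PySem.Chars.replace]
  rw [if_neg (by simp [h])]
  simpa using pvReplGo_spec old new h s.length s [] le_rfl

-- the cascade of pvRepl steps (A's loop, on code points)
def pvCascR (rs : List (List Char × List Char)) (s : List Char) : List Char :=
  rs.foldl (fun acc r => pvRepl r.1 r.2 acc) s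

theorem foldl_replace_toList :
    ∀ (l : List (String × String)) (c : String), (∀ p ∈ l, p.1.toList ≠ []) →
      (l.foldl (fun c p => PySem.Str.replace c p.1 p.2) c).toList =
        pvCascR (l.map (fun p => (p.1.toList, p.2.toList))) c.toList := by
  intro l
  induction l with
  | nil => intro c _; rfl
  | cons q l ih =>
    intro c hq
    simp only [List.foldl_cons, List.map_cons]
    rw [ih _ (fun p hp => hq p (List.mem_cons_of_mem q hp))]
    show pvCascR _ (PySem.Str.replace c q.1 q.2).toList = _
    rw [PySem.Str.toList_replace,
      replace_eq_pvRepl _ _ _ (hq q (List.mem_cons_self))]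
    rfl

theorem fix_typos_toList (content : String) :
    (fix_typos content).toList = pvCascR pvRules content.toList := by
  have h := foldl_replace_toList pvTyposA content (by decide)
  rw [fix_typos, h]
  congr 1

-- basic prefix facts
theorem pvPrefix_of_append {k a X : List Char} (h : k <+: a ++ X) : k <+: a ∨ a <+: k :=
  List.prefix_or_prefix_of_prefix h (List.prefix_append a X)

theorem pvPrefix_drop {k u X : List Char} (h1 : u <+: k) (h2 : k <+: u ++ X) :
    k.drop u.length <+: X := by
  obtain ⟨k', rfl⟩ := h1
  rw [List.drop_left]
  exact (List.prefix_append_right_inj u).mp h2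

-- findRule characterisations
theorem pvFindRule_none {rs : List (List Char × List Char)} {s : List Char}
    (h : pvFindRule rs s = none) : ∀ r ∈ rs, ¬ r.1 <+: s := by
  induction rs with
  | nil => intro r hr; cases hr
  | cons r0 rest ih =>
    intro r hr
    rw [pvFindRule] at h
    by_cases hp : r0.1.isPrefixOf s
    · rw [if_pos hp] at h; cases h
    · rw [if_neg hp] at h
      rcases List.mem_cons.mp hr with rfl | hm
      · exact fun hk => hp (List.isPrefixOf_iff_prefix.mpr hk)
      · exact ih h r hm

theorem pvFindRule_some {rs : List (List Char × List Char)} {s : List Char}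
    {r : List Char × List Char} (h : pvFindRule rs s = some r) :
    ∃ L1 L2, rs = L1 ++ r :: L2 ∧ r.1 <+: s ∧ ∀ r' ∈ L1, ¬ r'.1 <+: s := by
  induction rs with
  | nil => cases h
  | cons r0 rest ih =>
    rw [pvFindRule] at h
    by_cases hp : r0.1.isPrefixOf s
    · rw [if_pos hp] at h
      cases h
      exact ⟨[], rest, rfl, List.isPrefixOf_iff_prefix.mp hp, fun r' hr' => (by cases hr')⟩
    · rw [if_neg hp] at h
      obtain ⟨L1, L2, hrs, hpre, hL1⟩ := ih h
      refine ⟨r0 :: L1, L2, by simp [hrs], hpre, ?_⟩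
      intro r' hr'
      rcases List.mem_cons.mp hr' with rfl | hm
      · exact fun hk => hp (List.isPrefixOf_iff_prefix.mpr hk)
      · exact hL1 r' hm

-- pvScanW unfolding
theorem pvScanW_nil (rs : List (List Char × List Char)) : pvScanW rs [] = [] := by
  rw [pvScanW]

theorem pvScanW_none {rs : List (List Char × List Char)} {c : Char} {t : List Char}
    (h : pvFindRule rs (c :: t) = none) : pvScanW rs (c :: t) = c :: pvScanW rs t := by
  rw [pvScanW, h]

theorem pvScanW_some {rs : List (List Char × List Char)} {s : List Char}
    {r : List Char × List Char} (h : pvFindRule rs s = some r) (hne : r.1 ≠ []) :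
    pvScanW rs s = r.2 ++ pvScanW rs (s.drop r.1.length) := by
  obtain ⟨_, _, _, hpre, _⟩ := pvFindRule_some h
  match s, hpre with
  | c :: t, hpre =>
    have hd : List.drop (r.1.length - 1) t = List.drop r.1.length (c :: t) := by
      cases hr1 : r.1 with
      | nil => exact absurd hr1 hne
      | cons o os => simp
    rw [pvScanW, h]
    show r.2 ++ pvScanW rs (List.drop (r.1.length - 1) t) = _
    rw [hd]
  | [], hpre => exact absurd (List.prefix_nil.mp hpre) hne

-- pvCascR basics
theorem pvCascR_nil (rs : List (List Char × List Char)) : pvCascR rs [] = [] := by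
  induction rs with
  | nil => rfl
  | cons r rest ih => show pvCascR rest (pvRepl r.1 r.2 []) = []; rw [pvRepl_nil]; exact ih

theorem pvCascR_append (A B : List (List Char × List Char)) (s : List Char) :
    pvCascR (A ++ B) s = pvCascR B (pvCascR A s) := by
  unfold pvCascR
  rw [List.foldl_append]

theorem pvRepl_append (k v : List Char) :
    ∀ (a t : List Char), (∀ p, p < a.length → ¬ (k <+: a.drop p ++ t)) →
      pvRepl k v (a ++ t) = a ++ pvRepl k v t := by
  intro a
  induction a with
  | nil => intro t _; rfl
  | cons c a' ih =>
    intro t h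
    have h0 : ¬ k <+: (c :: (a' ++ t)) := by simpa using h 0 (by simp)
    rw [List.cons_append, pvRepl_cons_neg _ _ h0,
      ih t (fun p hp => by simpa using h (p + 1) (by simp; omega))]
    simp

theorem pvRepl_match (k v t : List Char) (hne : k ≠ []) :
    pvRepl k v (k ++ t) = v ++ pvRepl k v t := by
  obtain ⟨o, os, rfl⟩ : ∃ o os, k = o :: os := by
    cases k with
    | nil => exact absurd rfl hne
    | cons o os => exact ⟨o, os, rfl⟩
  rw [List.cons_append, pvRepl_cons_pos _ _ (by rw [← List.cons_append]; exact List.prefix_append _ _)]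
  congr 1
  simp only [List.length_cons, Nat.succ_sub_one]
  rw [List.drop_left]
-- danger tails: text that, following a replaced region, lets a later pass match across the seam
def pvTails : List (List Char) := ["ogeers".toList, "dentifaction".toList, "ightbulbs".toList]

-- the strings u for which prefix-reflection through the scan holds
def pvUOK (u : List Char) : Prop :=
  u = [] ∨ (∃ r ∈ pvRules, ∃ p, 0 < p ∧ u = r.1.drop p) ∨ (∃ d ∈ pvTails, ∃ p, u = d.drop p)

-- all keys nonempty
theorem pvFNE : ∀ r ∈ pvRules, r.1 ≠ [] := by decide

-- reflection facts: a uOK string that is a prefix of a value is a prefix of that value's key,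
-- and no value is a proper prefix of a uOK string
theorem pvFactF_key :
    ∀ rk ∈ pvRules, ∀ p, p < rk.1.length → 0 < p → ∀ r ∈ pvRules,
      ((rk.1.drop p) <+: r.2 → (rk.1.drop p) <+: r.1) ∧
      (r.2 <+: rk.1.drop p → r.2 = rk.1.drop p) := by
  decide

theorem pvFactF_tail :
    ∀ d ∈ pvTails, ∀ p, p < d.length → ∀ r ∈ pvRules,
      ((d.drop p) <+: r.2 → (d.drop p) <+: r.1) ∧
      (r.2 <+: d.drop p → r.2 = d.drop p) := by
  decide

theorem pvFactF :
    ∀ u, pvUOK u → u ≠ [] → ∀ r ∈ pvRules,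
      (u <+: r.2 → u <+: r.1) ∧ (r.2 <+: u → r.2 = u) := by
  rintro u (rfl | ⟨rk, hrk, p, hp, rfl⟩ | ⟨d, hd, p, rfl⟩) hne r hr
  · exact absurd rfl hne
  · have hlt : p < rk.1.length := by
      by_contra h
      exact hne (List.drop_eq_nil_of_le (by omega))
    exact pvFactF_key rk hrk p hlt hp r hr
  · have hlt : p < d.length := by
      by_contra h
      exact hne (List.drop_eq_nil_of_le (by omega))
    exact pvFactF_tail d hd p hlt r hr

-- pass-over facts for keys: an earlier key overlaps a later matched key only in the one known way
theorem pvFactPass1 :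
    ∀ i ∈ List.range pvRules.length, ∀ j ∈ List.range i,
      ∀ p ∈ List.range (pvRules[i]!.1).length,
      ((¬ ((pvRules[i]!.1).drop p <+: (pvRules[j]!).1) ∧
        ¬ ((pvRules[j]!).1 <+: (pvRules[i]!.1).drop p))
       ∨ (i = 4 ∧ j = 1 ∧ p = 10)) := by
  decide

-- pass-over facts for values: a later key overlaps a replaced value only in the two known ways
theorem pvFactPass2 :
    ∀ j ∈ List.range pvRules.length, ∀ i ∈ List.range j,
      ∀ p ∈ List.range (pvRules[i]!.2).length,
      ((¬ ((pvRules[i]!.2).drop p <+: (pvRules[j]!).1) ∧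
        ¬ ((pvRules[j]!).1 <+: (pvRules[i]!.2).drop p))
       ∨ (i = 2 ∧ j = 3 ∧ p = 8) ∨ (i = 4 ∧ j = 5 ∧ p = 11)) := by
  decide

-- pvUOK is closed under dropping the head
theorem pvUOK_tail {c : Char} {u : List Char} (h : pvUOK (c :: u)) : pvUOK u := by
  rcases h with h | ⟨r, hr, p, hp, he⟩ | ⟨d, hd, p, he⟩
  · cases h
  · refine Or.inr (Or.inl ⟨r, hr, p + 1, by omega, ?_⟩)
    rw [← List.drop_drop, ← he]
    rfl
  · refine Or.inr (Or.inr ⟨d, hd, p + 1, ?_⟩)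
    rw [← List.drop_drop, ← he]
    rfl

-- prefix reflection: the scan never creates a new occurrence of a uOK string at the front
theorem pvReflect (t : List Char) (n : Nat) (u : List Char) (hu : pvUOK u) :
    u <+: pvScanW (pvRules.take n) t → u <+: t := by
  suffices H : ∀ N (t : List Char), t.length ≤ N → ∀ n u, pvUOK u →
      u <+: pvScanW (pvRules.take n) t → u <+: t by
    exact H t.length t le_rfl n u hu
  intro N
  induction N with
  | zero =>
    intro t ht n u hu h
    have : t = [] := List.eq_nil_of_length_eq_zero (by omega)
    subst this
    rwa [pvScanW_nil] at h
  | succ N ih =>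
    intro t ht n u hu h
    match t, ht with
    | [], _ => rwa [pvScanW_nil] at h
    | c :: t', ht =>
      match hf : pvFindRule (pvRules.take n) (c :: t') with
      | some rm =>
        obtain ⟨L1, L2, hdec, hpre, _⟩ := pvFindRule_some hf
        have hmem : rm ∈ pvRules :=
          List.mem_of_mem_take
            (by rw [hdec]; exact List.mem_append_right _ List.mem_cons_self)
        have hne := pvFNE rm hmem
        rw [pvScanW_some hf hne] at h
        rcases eq_or_ne u [] with rfl | hu0
        · exact List.nil_prefix
        rcases pvPrefix_of_append h with h1 | h2
        · exact ((pvFactF u hu hu0 rm hmem).1 h1).trans hpre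
        · have heq := (pvFactF u hu hu0 rm hmem).2 h2
          have h1 : u <+: rm.2 := by rw [← heq]
          exact ((pvFactF u hu hu0 rm hmem).1 h1).trans hpre
      | none =>
        rw [pvScanW_none hf] at h
        match u, hu, h with
        | [], _, _ => exact List.nil_prefix
        | e :: u2, hu, h =>
          obtain ⟨rfl, h2⟩ := List.cons_prefix_cons.mp h
          have hu2 := pvUOK_tail hu
          have := ih t' (by simp at ht; omega) n u2 hu2 h2
          exact List.cons_prefix_cons.mpr ⟨rfl, this⟩

-- the list-level precondition
def pvP (s : List Char) : Prop :=
  ¬ ("hierarchialogeers".toList <:+: s) ∧ ¬ ("Fibbonacidentifaction".toList <:+: s) ∧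
  ¬ ("hierarchialightbulbs".toList <:+: s)

-- a cascade passes over a block none of its rules can match into
theorem pvCascAppend (M : List (List Char × List Char)) (a : List Char) :
    ∀ t, (∀ M1 r' M2, M = M1 ++ r' :: M2 → ∀ p, p < a.length →
          ¬ (r'.1 <+: a.drop p ++ pvCascR M1 t)) →
    pvCascR M (a ++ t) = a ++ pvCascR M t := by
  induction M with
  | nil => intro t _; rfl
  | cons r' M' ih =>
    intro t h
    have h0 : ∀ p, p < a.length → ¬ (r'.1 <+: a.drop p ++ t) := by
      intro p hp
      exact h [] r' M' rfl p hp
    show pvCascR M' (pvRepl r'.1 r'.2 (a ++ t)) = a ++ pvCascR M' (pvRepl r'.1 r'.2 t)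
    rw [pvRepl_append _ _ a t h0]
    refine ih (pvRepl r'.1 r'.2 t) ?_
    intro M1 r'' M2 hM p hp
    have := h (r' :: M1) r'' M2 (by rw [hM]; rfl) p hp
    exact this

theorem pvP_suffix {s t : List Char} (h : t <:+ s) (hP : pvP s) : pvP t :=
  ⟨fun hi => hP.1 (hi.trans h.isInfix), fun hi => hP.2.1 (hi.trans h.isInfix),
   fun hi => hP.2.2 (hi.trans h.isInfix)⟩

theorem pvPrefix_take {M : List (List Char × List Char)} (h : M <+: pvRules) :
    M = pvRules.take M.length := List.prefix_iff_eq_take.mp h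

theorem pvIdxLt {A B : List (List Char × List Char)} {r : List Char × List Char}
    (hAB : A ++ r :: B <+: pvRules) : A.length < pvRules.length := by
  obtain ⟨rest, hrest⟩ := hAB
  have := congrArg List.length hrest
  simp at this
  omega

theorem pvIdx {A B : List (List Char × List Char)} {r : List Char × List Char}
    (hAB : A ++ r :: B <+: pvRules) : pvRules[A.length]! = r := by
  have hlen := pvIdxLt hAB
  obtain ⟨rest, hrest⟩ := hAB
  rw [getElem!_pos pvRules _ hlen]
  have h1 : pvRules[A.length]? = some r := by
    rw [← hrest, List.append_assoc, List.getElem?_append_right (le_refl A.length)]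
    simp
  exact Option.some.inj ((List.getElem?_eq_getElem hlen).symm.trans h1)

-- main invariant: on danger-free input the cascade of any rule prefix equals the scan
theorem pvMain (s : List Char) (hP : pvP s) (n : Nat) :
    pvCascR (pvRules.take n) s = pvScanW (pvRules.take n) s := by
  suffices H : ∀ N (s : List Char), s.length ≤ N → pvP s → ∀ n,
      pvCascR (pvRules.take n) s = pvScanW (pvRules.take n) s by
    exact H s.length s le_rfl hP n
  intro N
  induction N with
  | zero =>
    intro s hs hP n
    have : s = [] := List.eq_nil_of_length_eq_zero (by omega)
    subst this
    rw [pvCascR_nil, pvScanW_nil]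
  | succ N ih =>
    intro s hs hP n
    match s, hs with
    | [], _ => rw [pvCascR_nil, pvScanW_nil]
    | c :: t, hs =>
      have htN : t.length ≤ N := by simp at hs; omega
      have hPt : pvP t := pvP_suffix (List.suffix_cons c t) hP
      match hf : pvFindRule (pvRules.take n) (c :: t) with
      | none =>
        have hnm := pvFindRule_none hf
        have hstep : pvCascR (pvRules.take n) (c :: t)
            = c :: pvCascR (pvRules.take n) t := by
          have := pvCascAppend (pvRules.take n) [c] t ?_
          · simpa using this
          intro M1 r' M2 hM p hp
          have hp0 : p = 0 := by simp at hp; omega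
          subst hp0
          simp only [List.drop_zero, List.singleton_append]
          have hM1R : M1 <+: pvRules :=
            List.IsPrefix.trans ⟨r' :: M2, hM.symm⟩ (List.take_prefix n pvRules)
          have hM1eq := pvPrefix_take hM1R
          have hr'T : r' ∈ pvRules.take n := by
            rw [hM]; exact List.mem_append_right _ List.mem_cons_self
          have hr'R : r' ∈ pvRules := List.mem_of_mem_take hr'T
          have hne := pvFNE r' hr'R
          intro hk
          rw [hM1eq, ih t htN hPt M1.length] at hk
          obtain ⟨e, w, hr1⟩ : ∃ e w, r'.1 = e :: w := by
            cases hr1 : r'.1 with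
            | nil => exact absurd hr1 hne
            | cons e w => exact ⟨e, w, rfl⟩
          rw [hr1] at hk
          obtain ⟨rfl, hw⟩ := List.cons_prefix_cons.mp hk
          have huOK : pvUOK w :=
            Or.inr (Or.inl ⟨r', hr'R, 1, one_pos, by rw [hr1]; rfl⟩)
          have hwt := pvReflect t M1.length w huOK hw
          exact hnm r' hr'T (by rw [hr1]; exact List.cons_prefix_cons.mpr ⟨rfl, hwt⟩)
        rw [hstep, ih t htN hPt n, pvScanW_none hf]
      | some r =>
        obtain ⟨L1, L2, hdec, hpre, hL1bad⟩ := pvFindRule_some hf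
        obtain ⟨t2, ht2⟩ := hpre
        have hTP : pvRules.take n <+: pvRules := List.take_prefix n pvRules
        have hdecP : L1 ++ r :: L2 <+: pvRules := by
          rw [← hdec]; exact hTP
        have hmemT : r ∈ pvRules.take n := by
          rw [hdec]; exact List.mem_append_right _ List.mem_cons_self
        have hmem : r ∈ pvRules := List.mem_of_mem_take hmemT
        have hne := pvFNE r hmem
        have ht2len : t2.length ≤ N := by
          have := congrArg List.length ht2
          simp at this hs
          have hr1 : 0 < r.1.length := List.length_pos_iff.mpr hne
          omega
        have hPt2 : pvP t2 := pvP_suffix ⟨r.1, ht2⟩ hP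
        have hL1R : L1 <+: pvRules :=
          List.IsPrefix.trans ⟨r :: L2, hdec.symm⟩ hTP
        have hL1eq := pvPrefix_take hL1R
        have hi : L1.length < pvRules.length := pvIdxLt hdecP
        have hri : pvRules[L1.length]! = r := pvIdx hdecP
        -- step 1: the earlier rules pass over the matched key
        have e1 : pvCascR L1 (r.1 ++ t2) = r.1 ++ pvCascR L1 t2 := by
          refine pvCascAppend L1 r.1 t2 ?_
          intro M1 r' M2 hM p hp
          have hMP : M1 ++ r' :: M2 <+: pvRules := by
            rw [← hM]; exact hL1R
          have hM1R : M1 <+: pvRules :=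
            List.IsPrefix.trans ⟨r' :: M2, hM.symm⟩ hL1R
          have hM1eq := pvPrefix_take hM1R
          have hmlt : M1.length < L1.length := by
            have := congrArg List.length hM
            simp at this; omega
          have hr'm : pvRules[M1.length]! = r' := pvIdx hMP
          intro hk
          rw [hM1eq, ih t2 ht2len hPt2 M1.length] at hk
          rcases pvFactPass1 L1.length (List.mem_range.mpr hi) M1.length
              (List.mem_range.mpr hmlt) p
              (List.mem_range.mpr (by rw [hri]; exact hp)) with ⟨hg1, hg2⟩ | ⟨hI, hJ, hp10⟩
          · rw [hri, hr'm] at hg1 hg2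
            rcases pvPrefix_of_append hk with h1 | h2
            · exact hg2 h1
            · exact hg1 h2
          · rw [hI] at hri
            rw [hJ] at hr'm
            subst hp10
            have hrv : r = ("hierarchial".toList, "hierarchical".toList) := by
              rw [← hri]; decide
            have hr'v : r' = ("logeers".toList, "loggers".toList) := by
              rw [← hr'm]; decide
            rw [hrv] at hk
            rw [hr'v] at hk
            have hp10' : (("hierarchial".toList, "hierarchical".toList).1.drop 10)
                <+: ("logeers".toList, "loggers".toList).1 := by decide
            have hdrop := pvPrefix_drop hp10' hk
            have hogeq : ("logeers".toList, "loggers".toList).1.drop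
                (("hierarchial".toList, "hierarchical".toList).1.drop 10).length
                = "ogeers".toList := by decide
            rw [hogeq] at hdrop
            have huOK : pvUOK ("ogeers".toList) :=
              Or.inr (Or.inr ⟨"ogeers".toList, by decide, 0, by rw [List.drop_zero]⟩)
            have hog := pvReflect t2 M1.length _ huOK hdrop
            refine hP.1 ?_
            have h1 : "hierarchialogeers".toList <+: "hierarchial".toList ++ t2 := by
              have hsplit : "hierarchialogeers".toList
                  = "hierarchial".toList ++ "ogeers".toList := by decide
              rw [hsplit]
              exact (List.prefix_append_right_inj _).mpr hog
            have h2 : "hierarchial".toList ++ t2 = c :: t := by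
              rw [show "hierarchial".toList = r.1 from by rw [hrv], ht2]
            exact (h2 ▸ h1).isInfix
        -- step 3: the later rules pass over the substituted value
        have e3 : pvCascR L2 (r.2 ++ pvCascR (L1 ++ [r]) t2)
            = r.2 ++ pvCascR L2 (pvCascR (L1 ++ [r]) t2) := by
          refine pvCascAppend L2 r.2 (pvCascR (L1 ++ [r]) t2) ?_
          intro M1 r'' M2 hM p hp
          have hassoc : ((L1 ++ [r]) ++ M1) ++ r'' :: M2 = L1 ++ r :: (M1 ++ r'' :: M2) := by
            simp
          have hMP : ((L1 ++ [r]) ++ M1) ++ r'' :: M2 <+: pvRules := by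
            rw [hassoc, ← hM, ← hdec]; exact hTP
          have hLM : (L1 ++ [r]) ++ M1 <+: pvRules :=
            List.IsPrefix.trans ⟨r'' :: M2, rfl⟩ hMP
          have hLMeq := pvPrefix_take hLM
          have hjlt : ((L1 ++ [r]) ++ M1).length < pvRules.length := pvIdxLt hMP
          have hr''m : pvRules[((L1 ++ [r]) ++ M1).length]! = r'' := pvIdx hMP
          have hilen : ((L1 ++ [r]) ++ M1).length = L1.length + 1 + M1.length := by
            simp; omega
          rw [hilen] at hr''m hjlt
          intro hk
          have hW : pvCascR M1 (pvCascR (L1 ++ [r]) t2)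
              = pvScanW (pvRules.take (((L1 ++ [r]) ++ M1).length)) t2 := by
            rw [← pvCascR_append]
            conv_lhs => rw [hLMeq]
            exact ih t2 ht2len hPt2 _
          rw [hilen] at hW
          rw [hW] at hk
          rcases pvFactPass2 (L1.length + 1 + M1.length) (List.mem_range.mpr hjlt)
              L1.length (List.mem_range.mpr (by omega)) p
              (List.mem_range.mpr (by rw [hri]; exact hp)) with ⟨hg1, hg2⟩ | ⟨hI, hJ, hp8⟩ | ⟨hI, hJ, hp11⟩
          · rw [hri] at hg1 hg2
            rw [hr''m] at hg1 hg2
            rcases pvPrefix_of_append hk with h1 | h2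
            · exact hg2 h1
            · exact hg1 h2
          · rw [hI] at hri
            rw [hJ] at hr''m
            subst hp8
            have hrv : r = ("Fibbonaci".toList, "Fibonacci".toList) := by
              rw [← hri]; decide
            have hr''v : r'' = ("identifaction".toList, "identification".toList) := by
              rw [← hr''m]; decide
            rw [hrv] at hk
            rw [hr''v] at hk
            have hpp : (("Fibbonaci".toList, "Fibonacci".toList).2.drop 8)
                <+: ("identifaction".toList, "identification".toList).1 := by decide
            have hdrop := pvPrefix_drop hpp hk
            have hteq : ("identifaction".toList, "identification".toList).1.drop
                (("Fibbonaci".toList, "Fibonacci".toList).2.drop 8).length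
                = "dentifaction".toList := by decide
            rw [hteq] at hdrop
            have huOK : pvUOK ("dentifaction".toList) :=
              Or.inr (Or.inr ⟨"dentifaction".toList, by decide, 0, by rw [List.drop_zero]⟩)
            have hog := pvReflect t2 (L1.length + 1 + M1.length) _ huOK hdrop
            refine hP.2.1 ?_
            have h1 : "Fibbonacidentifaction".toList <+: "Fibbonaci".toList ++ t2 := by
              have hsplit : "Fibbonacidentifaction".toList
                  = "Fibbonaci".toList ++ "dentifaction".toList := by decide
              rw [hsplit]
              exact (List.prefix_append_right_inj _).mpr hog
            have h2 : "Fibbonaci".toList ++ t2 = c :: t := by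
              rw [show "Fibbonaci".toList = r.1 from by rw [hrv], ht2]
            exact (h2 ▸ h1).isInfix
          · rw [hI] at hri
            rw [hJ] at hr''m
            subst hp11
            have hrv : r = ("hierarchial".toList, "hierarchical".toList) := by
              rw [← hri]; decide
            have hr''v : r'' = ("lightbulbs".toList, "light bulbs".toList) := by
              rw [← hr''m]; decide
            rw [hrv] at hk
            rw [hr''v] at hk
            have hpp : (("hierarchial".toList, "hierarchical".toList).2.drop 11)
                <+: ("lightbulbs".toList, "light bulbs".toList).1 := by decide
            have hdrop := pvPrefix_drop hpp hk
            have hteq : ("lightbulbs".toList, "light bulbs".toList).1.drop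
                (("hierarchial".toList, "hierarchical".toList).2.drop 11).length
                = "ightbulbs".toList := by decide
            rw [hteq] at hdrop
            have huOK : pvUOK ("ightbulbs".toList) :=
              Or.inr (Or.inr ⟨"ightbulbs".toList, by decide, 0, by rw [List.drop_zero]⟩)
            have hog := pvReflect t2 (L1.length + 1 + M1.length) _ huOK hdrop
            refine hP.2.2 ?_
            have h1 : "hierarchialightbulbs".toList <+: "hierarchial".toList ++ t2 := by
              have hsplit : "hierarchialightbulbs".toList
                  = "hierarchial".toList ++ "ightbulbs".toList := by decide
              rw [hsplit]
              exact (List.prefix_append_right_inj _).mpr hog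
            have h2 : "hierarchial".toList ++ t2 = c :: t := by
              rw [show "hierarchial".toList = r.1 from by rw [hrv], ht2]
            exact (h2 ▸ h1).isInfix
        -- assemble
        calc pvCascR (pvRules.take n) (c :: t)
            = pvCascR (L1 ++ r :: L2) (r.1 ++ t2) := by rw [hdec, ← ht2]
          _ = pvCascR (r :: L2) (pvCascR L1 (r.1 ++ t2)) := by
              rw [← pvCascR_append]
          _ = pvCascR L2 (pvRepl r.1 r.2 (r.1 ++ pvCascR L1 t2)) := by rw [e1]; rfl
          _ = pvCascR L2 (r.2 ++ pvRepl r.1 r.2 (pvCascR L1 t2)) := by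
              rw [pvRepl_match _ _ _ hne]
          _ = pvCascR L2 (r.2 ++ pvCascR (L1 ++ [r]) t2) := by rw [pvCascR_append]; rfl
          _ = r.2 ++ pvCascR L2 (pvCascR (L1 ++ [r]) t2) := e3
          _ = r.2 ++ pvCascR ((L1 ++ [r]) ++ L2) t2 := by
              rw [← pvCascR_append]
          _ = r.2 ++ pvCascR (pvRules.take n) t2 := by
              rw [show (L1 ++ [r]) ++ L2 = L1 ++ r :: L2 by simp, ← hdec]
          _ = r.2 ++ pvScanW (pvRules.take n) t2 := by
              rw [ih t2 ht2len hPt2 n]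
          _ = pvScanW (pvRules.take n) (c :: t) := by
              rw [pvScanW_some hf hne, ← ht2, List.drop_left]

-- ===== VERDICT (by name: the statement is the Claim_ definition above) =====
theorem fix_typos_spec : Claim_equal_fix_typos := by
  intro content _hDom hPre
  unfold Spec_fix_typos
  obtain ⟨h1, h2, h3⟩ := hPre
  have hP : pvP content.toList := by
    refine ⟨fun hinf => ?_, fun hinf => ?_, fun hinf => ?_⟩
    · have := (PySem.Str.isIn_iff_infix _ _).mpr hinf; rw [h1] at this; cases this
    · have := (PySem.Str.isIn_iff_infix _ _).mpr hinf; rw [h2] at this; cases this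
    · have := (PySem.Str.isIn_iff_infix _ _).mpr hinf; rw [h3] at this; cases this
  have hmain := pvMain content.toList hP 10
  have htake : pvRules.take 10 = pvRules := rfl
  rw [htake] at hmain
  have hA := fix_typos_toList content
  have hB : (fix_typos_alt content).toList = pvScanW pvRules content.toList := by
    rw [fix_typos_alt]
    simp
  have hTL : (fix_typos content).toList = (fix_typos_alt content).toList := by
    rw [hA, hB, hmain]
  have := congrArg String.ofList hTL
  simpa using this
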